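-- pv_equiv track=rewrite | github.com/not-empty/omniq-python | src/log_connections.py | parse_connected_clients
-- ===== SOURCE A (Python) =====
-- from typing import Optional
--
-- def parse_connected_clients(info_clients: str) -> Optional[int]:
--     # INFO clients output includes a line like: connected_clients:12
--     for line in info_clients.splitlines():
--         if line.startswith("connected_clients:"):
--             try:
--                 return int(line.split(":", 1)[1].strip())
--             except Exception:
--                 return None
--     return None
-- ===== SOURCE B (Python) =====
-- def parse_connected_clients(info_clients):
--     # Parse the whole INFO payload into a first-occurrence key table, then look up.
--     table = {}
--     for line in info_clients.splitlines():
--         key, sep, value = line.partition(":")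
--         if sep and key not in table:
--             table[key] = value
--     value = table.get("connected_clients")
--     if value is None:
--         return None
--     try:
--         return int(value.strip())
--     except ValueError:
--         return None
-- ===== Notes on version B (the rewrite author's own statement) =====
-- stated objective: alternative
-- what changed: A scans the lines and returns at the first line whose prefix matches the target key followed by a colon; B first parses every line into a first-occurrence key->value table via str.partition and then does a single dict lookup.
import Mathlib
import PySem

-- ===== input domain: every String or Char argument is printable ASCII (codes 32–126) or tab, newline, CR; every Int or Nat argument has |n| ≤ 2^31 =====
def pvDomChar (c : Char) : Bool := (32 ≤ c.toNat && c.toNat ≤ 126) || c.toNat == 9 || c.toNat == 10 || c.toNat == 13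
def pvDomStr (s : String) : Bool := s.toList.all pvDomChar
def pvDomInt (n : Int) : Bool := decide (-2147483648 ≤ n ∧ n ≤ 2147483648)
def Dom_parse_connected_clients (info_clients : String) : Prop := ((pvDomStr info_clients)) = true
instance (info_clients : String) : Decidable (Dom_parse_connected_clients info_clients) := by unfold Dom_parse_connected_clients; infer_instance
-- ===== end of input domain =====

-- B parses every line into a first-occurrence key->value table (str.partition) and then looks the key up,
-- instead of A's scan-until-first-prefix-match; same return value on every input (alternative decomposition).


-- ===== PORT A =====
-- for line in splitlines: if line.startswith("connected_clients:"): try: return int(line.split(":",1)[1].strip()) except: return None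
def pvScanA : List String → Option Int
  | [] => none
  | line :: rest =>
    if PySem.Str.startswith line "connected_clients:" then
      match (PySem.Str.splitMax? line ":" 1).bind (fun parts => PySem.List.pyGet? parts 1) with
      | some tail => PySem.Int.ofStr? (PySem.Str.strip tail)
      | none => none
    else pvScanA rest

def parse_connected_clients (info_clients : String) : Option Int :=
  pvScanA (PySem.Str.splitlines info_clients)

-- ===== PORT B =====
-- line.partition(":") ported by hand for the single-char separator ':' (exact: splits at the FIRST ':');
-- none plays the role of Python's empty `sep` part (no ':' in the line).
def pvPartitionColon : List Char → Option (List Char × List Char)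
  | [] => none
  | c :: rest =>
    if c = ':' then some ([], rest)
    else (pvPartitionColon rest).map (fun kv => (c :: kv.1, kv.2))

-- the body of B's for-loop: record key -> value only if the line has a ':' and the key is new
def pvStepB (d : PySem.Dict String String) (line : String) : PySem.Dict String String :=
  match pvPartitionColon line.toList with
  | some (k, v) =>
    if d.contains (String.ofList k) then d else d.insert (String.ofList k) (String.ofList v)
  | none => d

def parse_connected_clients_alt (info_clients : String) : Option Int :=
  match ((PySem.Str.splitlines info_clients).foldl pvStepB PySem.Dict.empty).get? "connected_clients" with
  | some v => PySem.Int.ofStr? (PySem.Str.strip v)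
  | none => none

-- ===== PRECONDITION & SPEC =====
def Spec_parse_connected_clients (info_clients : String) (out : Option Int) : Prop := out = parse_connected_clients_alt info_clients
instance (info_clients : String) (out : Option Int) : Decidable (Spec_parse_connected_clients info_clients out) := by unfold Spec_parse_connected_clients; infer_instance

-- ===== CLAIM (what is proved, stated in full; the proofs are below) =====
def Claim_equal_parse_connected_clients : Prop := ∀ (info_clients : String), Dom_parse_connected_clients info_clients → Spec_parse_connected_clients info_clients (parse_connected_clients info_clients)

-- ===== LEMMAS AND PROOFS =====

-- the value part of the first line whose key (text before the first ':') is exactly "connected_clients"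
def pvFirst : List String → Option String
  | [] => none
  | line :: rest =>
    match pvPartitionColon line.toList with
    | some (k, v) => if k = "connected_clients".toList then some (String.ofList v) else pvFirst rest
    | none => pvFirst rest

theorem pvFirst_cons_some {line : String} {k v : List Char} (rest : List String)
    (e : pvPartitionColon line.toList = some (k, v)) :
    pvFirst (line :: rest)
      = if k = "connected_clients".toList then some (String.ofList v) else pvFirst rest := by
  simp only [pvFirst]; rw [e]

theorem pvFirst_cons_none {line : String} (rest : List String)
    (e : pvPartitionColon line.toList = none) :
    pvFirst (line :: rest) = pvFirst rest := by
  simp only [pvFirst]; rw [e]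

theorem pvStepB_some {line : String} {k v : List Char} (d : PySem.Dict String String)
    (e : pvPartitionColon line.toList = some (k, v)) :
    pvStepB d line
      = if d.contains (String.ofList k) then d else d.insert (String.ofList k) (String.ofList v) := by
  simp only [pvStepB]; rw [e]

theorem pvStepB_none {line : String} (d : PySem.Dict String String)
    (e : pvPartitionColon line.toList = none) :
    pvStepB d line = d := by
  simp only [pvStepB]; rw [e]

theorem pvPartitionColon_append (k v : List Char) (hk : ':' ∉ k) :
    pvPartitionColon (k ++ ':' :: v) = some (k, v) := by
  induction k with
  | nil => simp [pvPartitionColon]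
  | cons c rest ih =>
    simp only [List.cons_append, pvPartitionColon]
    rw [if_neg (by intro hc; exact hk (hc ▸ List.mem_cons_self)),
        ih (fun hm => hk (List.mem_cons_of_mem _ hm))]
    rfl

theorem pvPartitionColon_inv (l : List Char) :
    ∀ k v, pvPartitionColon l = some (k, v) → l = k ++ ':' :: v ∧ ':' ∉ k := by
  induction l with
  | nil => intro k v h; simp [pvPartitionColon] at h
  | cons c rest ih =>
    intro k v h
    simp only [pvPartitionColon] at h
    by_cases hc : c = ':'
    · rw [if_pos hc] at h
      simp only [Option.some.injEq, Prod.mk.injEq] at h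
      obtain ⟨hk, hv⟩ := h
      subst hc; simp [← hk, ← hv]
    · rw [if_neg hc] at h
      cases e : pvPartitionColon rest with
      | none => rw [e] at h; simp at h
      | some kv =>
        rw [e] at h
        obtain ⟨k', v'⟩ := kv
        simp only [Option.map_some, Option.some.injEq, Prod.mk.injEq] at h
        obtain ⟨hk, hv⟩ := h
        obtain ⟨h1, h2⟩ := ih k' v' e
        subst hv
        constructor
        · simp [← hk, h1]
        · rw [← hk]
          simp only [List.mem_cons, not_or]
          exact ⟨fun h => hc h.symm, h2⟩

-- A's split(":", 1), via the fuelled go of PySem.Chars.splitOnMax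
theorem go_m_zero (v cur : List Char) (acc : List (List Char)) (fuel : Nat) :
    PySem.Chars.splitOnMax.go [':'] fuel 0 v cur acc = ((cur.reverse ++ v) :: acc).reverse := by
  cases fuel with
  | zero => rfl
  | succ f => cases v with
    | nil => simp [PySem.Chars.splitOnMax.go]
    | cons c rest => rfl

theorem go_m_one (k : List Char) (hk : ':' ∉ k) :
    ∀ (fuel : Nat), k.length + 1 ≤ fuel → ∀ (cur v : List Char) (acc : List (List Char)),
    PySem.Chars.splitOnMax.go [':'] fuel 1 (k ++ ':' :: v) cur acc
      = (v :: (cur.reverse ++ k) :: acc).reverse := by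
  induction k with
  | nil =>
    intro fuel hf cur v acc
    cases fuel with
    | zero => omega
    | succ f =>
      simp only [List.nil_append, PySem.Chars.splitOnMax.go]
      rw [if_neg (by omega), if_pos (by simp [List.isPrefixOf])]
      simpa using go_m_zero v [] (cur.reverse :: acc) f
  | cons c rest ih =>
    intro fuel hf cur v acc
    cases fuel with
    | zero => simp at hf
    | succ f =>
      have hc : c ≠ ':' := fun hc => hk (hc ▸ List.mem_cons_self)
      simp only [List.cons_append, PySem.Chars.splitOnMax.go]
      rw [if_neg (by omega),
          if_neg (by simp only [List.isPrefixOf, Bool.and_eq_true, beq_iff_eq]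
                     intro h
                     exact hc h.1.symm),
          ih (fun hm => hk (List.mem_cons_of_mem _ hm)) f (by simp at hf; omega) (c :: cur) v acc]
      simp

theorem splitMax_colon (k v : List Char) (hk : ':' ∉ k) :
    PySem.Chars.splitMax? (k ++ ':' :: v) [':'] 1 = some [k, v] := by
  simp only [PySem.Chars.splitMax?, PySem.Chars.splitOnMax]
  rw [if_neg (by simp), if_neg (by omega), Int.toNat_one]
  rw [go_m_one k hk _ (by simp) [] v []]
  simp

theorem cc_toList : ("connected_clients:").toList = "connected_clients".toList ++ [':'] := by decide

theorem colon_toList : (":" : String).toList = [':'] := by decide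

theorem cc_no_colon : (':' : Char) ∉ "connected_clients".toList := by decide

theorem scanA_eq_first (lines : List String) :
    pvScanA lines = (pvFirst lines).bind (fun v => PySem.Int.ofStr? (PySem.Str.strip v)) := by
  induction lines with
  | nil => rfl
  | cons line rest ih =>
    simp only [pvScanA]
    by_cases hp : ("connected_clients:").toList.IsPrefix line.toList
    · rw [if_pos (by simp only [PySem.Str.startswith_eq, PySem.Chars.startswith_iff]; exact hp)]
      obtain ⟨t, ht⟩ := hp
      have hline : line.toList = "connected_clients".toList ++ ':' :: t := by
        rw [← ht, cc_toList]; simp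
      rw [pvFirst_cons_some rest (by rw [hline]; exact pvPartitionColon_append _ t cc_no_colon),
          if_pos rfl]
      simp only [PySem.Str.splitMax?, hline, colon_toList, splitMax_colon _ t cc_no_colon]
      simp [PySem.List.pyGet?, PySem.List.pyIdx?]
    · rw [if_neg (by simp only [PySem.Str.startswith_eq, PySem.Chars.startswith_iff]; exact hp)]
      cases e : pvPartitionColon line.toList with
      | none => rw [pvFirst_cons_none rest e, ih]
      | some kv =>
        obtain ⟨k, v⟩ := kv
        obtain ⟨h1, h2⟩ := pvPartitionColon_inv line.toList k v e
        have hk : k ≠ "connected_clients".toList := by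
          intro hkc
          exact hp ⟨v, by rw [cc_toList, h1, hkc]; simp⟩
        rw [pvFirst_cons_some rest e, if_neg hk, ih]

theorem ofList_cc : String.ofList "connected_clients".toList = "connected_clients" := by decide

theorem table_get (lines : List String) :
    ∀ (d : PySem.Dict String String),
    (lines.foldl pvStepB d).get? "connected_clients"
      = (d.get? "connected_clients").or (pvFirst lines) := by
  induction lines with
  | nil => intro d; simp [pvFirst]
  | cons line rest ih =>
    intro d
    simp only [List.foldl_cons]
    cases e : pvPartitionColon line.toList with
    | none => rw [pvStepB_none d e, pvFirst_cons_none rest e, ih]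
    | some kv =>
      obtain ⟨k, v⟩ := kv
      rw [pvStepB_some d e, pvFirst_cons_some rest e]
      by_cases hk : k = "connected_clients".toList
      · subst hk
        rw [ofList_cc, if_pos rfl]
        by_cases hc : (d.contains "connected_clients") = true
        · rw [if_pos hc, ih]
          rw [PySem.Dict.contains_eq_isSome_get?] at hc
          cases eg : d.get? "connected_clients" with
          | none => rw [eg] at hc; simp at hc
          | some w => simp
        · rw [if_neg hc, ih, PySem.Dict.get?_insert_self]
          rw [PySem.Dict.contains_eq_isSome_get?] at hc
          cases eg : d.get? "connected_clients" with
          | none => simp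
          | some w => rw [eg] at hc; simp at hc
      · have hne : ("connected_clients" : String) ≠ String.ofList k := by
          intro h
          have := congrArg String.toList h
          simp only [String.toList_ofList] at this
          exact hk this.symm
        rw [if_neg hk]
        by_cases hc : (d.contains (String.ofList k)) = true
        · rw [if_pos hc, ih]
        · rw [if_neg hc, ih, PySem.Dict.get?_insert_of_ne _ _ hne]

theorem matchBind (o : Option String) (f : String → Option Int) :
    o.bind f = match o with | some v => f v | none => none := by
  cases o <;> rfl

-- ===== VERDICT (by name: the statement is the Claim_ definition above) =====
theorem parse_connected_clients_spec : Claim_equal_parse_connected_clients := by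
  intro s _
  unfold Spec_parse_connected_clients parse_connected_clients parse_connected_clients_alt
  rw [table_get, PySem.Dict.get?_empty, Option.none_or, scanA_eq_first]
  exact matchBind _ _
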